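-- pv_equiv track=rewrite | github.com/mouredev/roadmap-retos-programacion | Roadmap/47 - CALENDARIO DE ADVIENTO/python/duendeintemporal.py | draw_calendar
-- ===== SOURCE A (Python) =====
-- def draw_calendar(discovered_days):
--     COLUMNS_COUNT = 6
--     CELL_WIDTH = 4
--     CELL_HEIGHT = 3
--
--     calendar = ''
--
--     for row in range(CELL_HEIGHT):
--         for day in range(1, 25):
--             if row == 1:
--                 if day in discovered_days:
--                     calendar += '*' * CELL_WIDTH
--                 else:
--                     calendar += f'*{str(day).zfill(2)}*'
--             else:
--                 calendar += '*' * CELL_WIDTH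
--
--             if day % COLUMNS_COUNT == 0:
--                 calendar += '\n'
--             else:
--                 calendar += ' '
--         calendar += '\n'
--
--     return calendar
-- ===== SOURCE B (Python) =====
-- def draw_calendar(discovered_days):
--     star_block = ('**** ' * 5 + '****\n') * 4 + '\n'
--     mid = []
--     for day in range(1, 25):
--         cell = '****' if day in discovered_days else f'*{str(day).zfill(2)}*'
--         mid.append(cell + ('\n' if day % 6 == 0 else ' '))
--     middle = ''.join(mid) + '\n'
--     return star_block + middle + star_block
-- ===== Notes on version B (the rewrite author's own statement) =====
-- stated objective: simpler
-- what changed: Replaces A's char-by-char 3-row x 24-day nested accumulation with a day-major build: the constant all-star block is built once by string repetition and reused for the top and bottom rows, and the variable middle row is assembled in a single pass over the 24 days.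
import Mathlib
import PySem

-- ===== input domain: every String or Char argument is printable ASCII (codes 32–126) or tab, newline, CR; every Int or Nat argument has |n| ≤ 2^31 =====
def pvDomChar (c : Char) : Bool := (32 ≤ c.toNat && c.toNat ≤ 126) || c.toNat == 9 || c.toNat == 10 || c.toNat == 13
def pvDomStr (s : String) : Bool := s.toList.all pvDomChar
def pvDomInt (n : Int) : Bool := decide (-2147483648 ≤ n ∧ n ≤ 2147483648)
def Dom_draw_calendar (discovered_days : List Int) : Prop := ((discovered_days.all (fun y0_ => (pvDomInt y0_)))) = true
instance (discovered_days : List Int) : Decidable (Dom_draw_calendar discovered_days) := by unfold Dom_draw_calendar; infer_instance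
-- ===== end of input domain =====

-- B restructures A's char-by-char 3×24 nested accumulation into a day-major build: the constant
-- all-star block is built once and reused for rows 0 and 2, and the middle row is built in a
-- single pass over the 24 days (objective: simpler decomposition, same cost).

-- ===== PORT A =====
-- accumulation is done on List Char (String.ofList at the end) so the kernel can unfold it; '+=' is '++'
def draw_calendar (discovered_days : List Int) : String :=
  let cal : List Char :=
    (PySem.List.pyRange 0 3 1).foldl (fun cal row =>
      let cal :=
        (PySem.List.pyRange 1 25 1).foldl (fun cal day =>
          let cal :=
            if row == 1 then
              if discovered_days.contains day then
                cal ++ ['*','*','*','*']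
              else
                cal ++ ['*'] ++ PySem.Chars.zfill (PySem.Int.toChars day) 2 ++ ['*']
            else
              cal ++ ['*','*','*','*']
          if PySem.Int.mod day 6 == 0 then cal ++ ['\n'] else cal ++ [' ']) cal
      cal ++ ['\n']) []
  String.ofList cal

-- ===== PORT B =====
-- Python string repetition s * n
def pvRep (s : List Char) (n : Nat) : List Char := (List.replicate n s).flatten

def draw_calendar_alt (discovered_days : List Int) : String :=
  let star_block : List Char := pvRep (pvRep ['*','*','*','*',' '] 5 ++ ['*','*','*','*','\n']) 4 ++ ['\n']
  let mid : List (List Char) :=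
    (PySem.List.pyRange 1 25 1).foldl (fun acc day =>
      let cell : List Char :=
        if discovered_days.contains day then ['*','*','*','*']
        else ['*'] ++ PySem.Chars.zfill (PySem.Int.toChars day) 2 ++ ['*']
      acc ++ [cell ++ (if PySem.Int.mod day 6 == 0 then ['\n'] else [' '])]) []
  let middle : List Char := mid.flatten ++ ['\n']
  String.ofList (star_block ++ middle ++ star_block)

-- ===== PRECONDITION & SPEC =====
def Spec_draw_calendar (discovered_days : List Int) (out : String) : Prop := out = draw_calendar_alt discovered_days
instance (discovered_days : List Int) (out : String) : Decidable (Spec_draw_calendar discovered_days out) := by unfold Spec_draw_calendar; infer_instance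

-- ===== CLAIM (what is proved, stated in full; the proofs are below) =====
def Claim_equal_draw_calendar : Prop := ∀ (discovered_days : List Int), Dom_draw_calendar discovered_days → Spec_draw_calendar discovered_days (draw_calendar discovered_days)

-- ===== LEMMAS AND PROOFS =====

-- ===== VERDICT (by name: the statement is the Claim_ definition above) =====
theorem draw_calendar_spec : Claim_equal_draw_calendar := by
  intro dd _
  unfold Spec_draw_calendar draw_calendar draw_calendar_alt
  -- the per-day chunk of A's row `row` (cell plus separator)
  have hinner : ∀ (row : Int) (cal : List Char),
      (PySem.List.pyRange 1 25 1).foldl (fun cal day =>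
        let cal :=
          if row == 1 then
            if dd.contains day then
              cal ++ ['*','*','*','*']
            else
              cal ++ ['*'] ++ PySem.Chars.zfill (PySem.Int.toChars day) 2 ++ ['*']
          else
            cal ++ ['*','*','*','*']
        if PySem.Int.mod day 6 == 0 then cal ++ ['\n'] else cal ++ [' ']) cal
      = cal ++ (PySem.List.pyRange 1 25 1).flatMap (fun day =>
          (if row == 1 then
             if dd.contains day then ['*','*','*','*']
             else ['*'] ++ PySem.Chars.zfill (PySem.Int.toChars day) 2 ++ ['*']
           else ['*','*','*','*'])
          ++ (if PySem.Int.mod day 6 == 0 then ['\n'] else [' '])) := by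
    intro row cal
    rw [show (fun (cal : List Char) (day : Int) =>
        let cal :=
          if row == 1 then
            if dd.contains day then
              cal ++ ['*','*','*','*']
            else
              cal ++ ['*'] ++ PySem.Chars.zfill (PySem.Int.toChars day) 2 ++ ['*']
          else
            cal ++ ['*','*','*','*']
        if PySem.Int.mod day 6 == 0 then cal ++ ['\n'] else cal ++ [' '])
      = (fun (cal : List Char) (day : Int) => cal ++
          ((if row == 1 then
              if dd.contains day then ['*','*','*','*']
              else ['*'] ++ PySem.Chars.zfill (PySem.Int.toChars day) 2 ++ ['*']
            else ['*','*','*','*'])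
           ++ (if PySem.Int.mod day 6 == 0 then ['\n'] else [' ']))) from by
        funext cal day
        dsimp only []
        split_ifs <;> simp [List.append_assoc]]
    exact PySem.List.foldl_append_eq_flatMap _ _ _
  simp only [hinner]
  rw [show (fun (cal : List Char) (row : Int) =>
        (cal ++ (PySem.List.pyRange 1 25 1).flatMap (fun day =>
          (if row == 1 then
             if dd.contains day then ['*','*','*','*']
             else ['*'] ++ PySem.Chars.zfill (PySem.Int.toChars day) 2 ++ ['*']
           else ['*','*','*','*'])
          ++ (if PySem.Int.mod day 6 == 0 then ['\n'] else [' ']))) ++ ['\n'])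
      = (fun (cal : List Char) (row : Int) => cal ++
          ((PySem.List.pyRange 1 25 1).flatMap (fun day =>
            (if row == 1 then
               if dd.contains day then ['*','*','*','*']
               else ['*'] ++ PySem.Chars.zfill (PySem.Int.toChars day) 2 ++ ['*']
             else ['*','*','*','*'])
            ++ (if PySem.Int.mod day 6 == 0 then ['\n'] else [' '])) ++ ['\n'])) from by
      funext cal row; simp [List.append_assoc]]
  rw [PySem.List.foldl_append_eq_flatMap]
  rw [PySem.List.foldl_append_eq_flatMap]
  -- B's list-of-cells fold, flattened, is a flatMap of per-day chunks
  have hflat : ∀ (l : List Int) (f : Int → List Char),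
      (l.flatMap (fun x => [f x])).flatten = l.flatMap f := by
    intro l f; rw [← List.map_eq_flatMap]; rfl
  -- the constant all-star block equals one whole row of A (ground fact)
  have hstar : pvRep (pvRep ['*','*','*','*',' '] 5 ++ ['*','*','*','*','\n']) 4 =
      (PySem.List.pyRange 1 25 1).flatMap (fun day =>
        (['*','*','*','*'] : List Char) ++ (if PySem.Int.mod day 6 == 0 then ['\n'] else [' '])) := by
    decide
  have h3 : PySem.List.pyRange 0 3 1 = [0, 1, 2] := by decide
  rw [h3]
  simp only [List.flatMap_cons, List.flatMap_nil, List.append_nil, List.nil_append, hflat,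
    show ((0 : Int) == 1) = false from rfl, show ((1 : Int) == 1) = true from rfl,
    show ((2 : Int) == 1) = false from rfl, Bool.false_eq_true, if_false, if_true]
  rw [← hstar]
  simp [List.append_assoc]
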